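-- pv_equiv track=rewrite | github.com/RuokeZhang/LC-OA | amazon2503/idle_robot.py | countIdleRobots
-- ===== SOURCE A (Python) =====
-- from collections import defaultdict
--
-- def countIdleRobots(x_coords, y_coords):
--     # 使用defaultdict来简化初始化步骤
--     horizontal_bounds = defaultdict(lambda: [float('inf'), float('-inf')])
--     vertical_bounds = defaultdict(lambda: [float('inf'), float('-inf')])
--
--     # 更新每个坐标点对应的行和列的边界值
--     for x, y in zip(x_coords, y_coords):
--         horizontal_bounds[y][0] = min(horizontal_bounds[y][0], x)
--         horizontal_bounds[y][1] = max(horizontal_bounds[y][1], x)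
--         vertical_bounds[x][0] = min(vertical_bounds[x][0], y)
--         vertical_bounds[x][1] = max(vertical_bounds[x][1], y)
--
--     idle_robot_count = 0
--
--     # 检查每个机器人是否为闲置状态
--     for x, y in zip(x_coords, y_coords):
--         if (horizontal_bounds[y][0] < x < horizontal_bounds[y][1]) and \
--            (vertical_bounds[x][0] < y < vertical_bounds[x][1]):
--             idle_robot_count += 1
--
--     return idle_robot_count
-- ===== SOURCE B (Python) =====
-- def countIdleRobots(x_coords, y_coords):
--     pts = list(zip(x_coords, y_coords))
--
--     def interior(x, y):
--         return (any(px < x for px, py in pts if py == y)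
--                 and any(px > x for px, py in pts if py == y)
--                 and any(py < y for px, py in pts if px == x)
--                 and any(py > y for px, py in pts if px == x))
--
--     return sum(1 for x, y in pts if interior(x, y))
-- ===== Notes on version B (the rewrite author's own statement) =====
-- stated objective: simpler
-- what changed: A builds row/column min-max bounds dictionaries in a first pass and then tests each point against the stored bounds; B keeps no bounds at all and instead tests each point directly by existence scans over the point list (is there a strictly smaller and a strictly larger x in the same row, and likewise for y in the same column), which is equivalent because min(group) < x < max(group) iff such neighbours exist.
import Mathlib
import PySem

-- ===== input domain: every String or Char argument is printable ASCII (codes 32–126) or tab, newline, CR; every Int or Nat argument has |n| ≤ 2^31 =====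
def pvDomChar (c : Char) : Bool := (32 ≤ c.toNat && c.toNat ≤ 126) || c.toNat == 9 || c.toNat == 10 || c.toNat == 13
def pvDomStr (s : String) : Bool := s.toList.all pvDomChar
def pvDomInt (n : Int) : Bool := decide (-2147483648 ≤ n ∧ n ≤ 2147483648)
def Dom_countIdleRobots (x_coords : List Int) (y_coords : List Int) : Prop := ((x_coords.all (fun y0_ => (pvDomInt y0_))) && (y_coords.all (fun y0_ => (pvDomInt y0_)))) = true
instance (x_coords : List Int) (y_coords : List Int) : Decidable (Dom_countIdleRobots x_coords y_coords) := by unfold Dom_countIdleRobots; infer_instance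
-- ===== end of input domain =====

-- B drops A's bounds dictionaries entirely: it tests each point by existence scans over the point list (a strictly smaller and larger x in its row, likewise y in its column); objective: simpler, O(n^2) vs A's O(n).


-- ===== PORT A =====
-- one defaultdict bounds update: the [inf, -inf] float sentinel is replaced the first
-- time a key is touched (min(inf,v)=v, max(-inf,v)=v), so 'none ↦ (v,v)' is exact
def pvAStep (d : PySem.Dict Int (Int × Int)) (k v : Int) : PySem.Dict Int (Int × Int) :=
  d.insert k (match d.get? k with
    | none => (v, v)
    | some (lo, hi) => (min lo v, max hi v))

def countIdleRobots (x_coords : List Int) (y_coords : List Int) : Int :=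
  let pts := x_coords.zip y_coords
  let h := pts.foldl (fun d p => pvAStep d p.2 p.1) PySem.Dict.empty
  let v := pts.foldl (fun d p => pvAStep d p.1 p.2) PySem.Dict.empty
  pts.foldl (fun acc p =>
    -- an absent key reads the defaultdict default [inf, -inf]: 'inf < x < -inf' is False
    let hc : Bool := match h.get? p.2 with
      | none => false
      | some (lo, hi) => decide (lo < p.1) && decide (p.1 < hi)
    let vc : Bool := match v.get? p.1 with
      | none => false
      | some (lo, hi) => decide (lo < p.2) && decide (p.2 < hi)
    if hc && vc then acc + 1 else acc) 0

-- ===== PORT B =====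
-- Source B's interior(x, y): four 'any' existence scans over the zipped point list
def pvInterior (pts : List (Int × Int)) (x y : Int) : Bool :=
  (pts.any fun p => p.2 == y && decide (p.1 < x)) &&
  (pts.any fun p => p.2 == y && decide (x < p.1)) &&
  (pts.any fun p => p.1 == x && decide (p.2 < y)) &&
  (pts.any fun p => p.1 == x && decide (y < p.2))

def countIdleRobots_alt (x_coords : List Int) (y_coords : List Int) : Int :=
  let pts := x_coords.zip y_coords
  pts.foldl (fun acc p => if pvInterior pts p.1 p.2 then acc + 1 else acc) 0

-- ===== PRECONDITION & SPEC =====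
def Spec_countIdleRobots (x_coords : List Int) (y_coords : List Int) (out : Int) : Prop := out = countIdleRobots_alt x_coords y_coords
instance (x_coords : List Int) (y_coords : List Int) (out : Int) : Decidable (Spec_countIdleRobots x_coords y_coords out) := by unfold Spec_countIdleRobots; infer_instance

-- ===== CLAIM =====
def Claim_equal_countIdleRobots : Prop := ∀ (x_coords : List Int) (y_coords : List Int), Dom_countIdleRobots x_coords y_coords → Spec_countIdleRobots x_coords y_coords (countIdleRobots x_coords y_coords)

-- ===== LEMMAS AND PROOFS =====

-- the values at key k, in order, of a pair list keyed by the first component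
def pvGrp (l : List (Int × Int)) (k : Int) : List Int :=
  (l.filter (fun p => p.1 == k)).map (·.2)

lemma pvGrp_cons (p : Int × Int) (l : List (Int × Int)) (k : Int) :
    pvGrp (p :: l) k = if p.1 = k then p.2 :: pvGrp l k else pvGrp l k := by
  by_cases h : p.1 = k <;> simp [pvGrp, h]

lemma pvGrp_mem (l : List (Int × Int)) (k w : Int) :
    w ∈ pvGrp l k ↔ ∃ q ∈ l, q.1 = k ∧ q.2 = w := by
  simp [pvGrp, List.mem_filter]

-- A's dict characterized by its group list
lemma pvA_get? (l : List (Int × Int)) (d : PySem.Dict Int (Int × Int)) (k : Int) :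
    (l.foldl (fun d p => pvAStep d p.1 p.2) d).get? k
      = (pvGrp l k).foldl
          (fun o v => some (match o with
            | none => (v, v)
            | some (lo, hi) => (min lo v, max hi v))) (d.get? k) := by
  induction l generalizing d with
  | nil => rfl
  | cons p l ih =>
    rw [List.foldl_cons, ih, pvGrp_cons]
    by_cases h : k = p.1
    · subst h
      simp [pvAStep, PySem.Dict.get?_insert_self]
    · rw [if_neg (fun hh => h hh.symm)]
      simp [pvAStep, PySem.Dict.get?_insert, h]

lemma pvA_fold_some (xs : List Int) (q : Int × Int) :
    xs.foldl (fun o v => some (match o with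
        | none => (v, v)
        | some (lo, hi) => (min lo v, max hi v))) (some q)
      = some (xs.foldl (fun q w => (min q.1 w, max q.2 w)) q) := by
  induction xs generalizing q with
  | nil => rfl
  | cons v xs ih => simp [List.foldl_cons, ih]

lemma pvPairFold (rest : List Int) (a b : Int) :
    rest.foldl (fun q w => (min q.1 w, max q.2 w)) (a, b)
      = (rest.foldl min a, rest.foldl max b) := by
  induction rest generalizing a b with
  | nil => rfl
  | cons w rest ih => simp [List.foldl_cons, ih]

lemma pvFoldlMin_lt (rest : List Int) (v x : Int) :
    rest.foldl min v < x ↔ v < x ∨ ∃ w ∈ rest, w < x := by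
  induction rest generalizing v with
  | nil => simp
  | cons w rest ih =>
    rw [List.foldl_cons, ih]
    simp only [min_lt_iff, List.mem_cons]
    constructor
    · rintro (h | ⟨u, hu, h⟩)
      · tauto
      · exact Or.inr ⟨u, Or.inr hu, h⟩
    · rintro (h | ⟨u, hu | hu, h⟩)
      · tauto
      · exact Or.inl (Or.inr (hu ▸ h))
      · exact Or.inr ⟨u, hu, h⟩

lemma pvLt_foldlMax (rest : List Int) (v x : Int) :
    x < rest.foldl max v ↔ x < v ∨ ∃ w ∈ rest, x < w := by
  induction rest generalizing v with
  | nil => simp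
  | cons w rest ih =>
    rw [List.foldl_cons, ih]
    simp only [lt_max_iff, List.mem_cons]
    constructor
    · rintro (h | ⟨u, hu, h⟩)
      · tauto
      · exact Or.inr ⟨u, Or.inr hu, h⟩
    · rintro (h | ⟨u, hu | hu, h⟩)
      · tauto
      · exact Or.inl (Or.inr (hu ▸ h))
      · exact Or.inr ⟨u, hu, h⟩

-- KEY: for a point of the list, A's bounds test at its key equals B's two existence scans
lemma pvCondEq (l : List (Int × Int)) (k x : Int) (hx : (k, x) ∈ l) :
    (match (l.foldl (fun d p => pvAStep d p.1 p.2)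
        (PySem.Dict.empty : PySem.Dict Int (Int × Int))).get? k with
      | none => false
      | some (lo, hi) => decide (lo < x) && decide (x < hi))
    = ((l.any fun q => q.1 == k && decide (q.2 < x)) &&
       (l.any fun q => q.1 == k && decide (x < q.2))) := by
  rw [pvA_get?]
  have hxg : x ∈ pvGrp l k := (pvGrp_mem l k x).mpr ⟨(k, x), hx, rfl, rfl⟩
  cases hg : pvGrp l k with
  | nil => rw [hg] at hxg; simp at hxg
  | cons v rest =>
    simp only [PySem.Dict.get?_empty, List.foldl_cons, pvA_fold_some, pvPairFold]
    rw [Bool.eq_iff_iff]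
    simp only [Bool.and_eq_true, decide_eq_true_eq, List.any_eq_true, beq_iff_eq,
      pvFoldlMin_lt, pvLt_foldlMax]
    have hv : ∀ w, (w = v ∨ w ∈ rest) ↔ w ∈ pvGrp l k := by
      intro w; rw [hg]; simp
    constructor
    · rintro ⟨hlo, hhi⟩
      refine ⟨?_, ?_⟩
      · rcases hlo with h | ⟨w, hw, h⟩
        · obtain ⟨q, hq, h1, h2⟩ := (pvGrp_mem l k v).mp ((hv v).mp (Or.inl rfl))
          exact ⟨q, hq, h1, by omega⟩
        · obtain ⟨q, hq, h1, h2⟩ := (pvGrp_mem l k w).mp ((hv w).mp (Or.inr hw))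
          exact ⟨q, hq, h1, by omega⟩
      · rcases hhi with h | ⟨w, hw, h⟩
        · obtain ⟨q, hq, h1, h2⟩ := (pvGrp_mem l k v).mp ((hv v).mp (Or.inl rfl))
          exact ⟨q, hq, h1, by omega⟩
        · obtain ⟨q, hq, h1, h2⟩ := (pvGrp_mem l k w).mp ((hv w).mp (Or.inr hw))
          exact ⟨q, hq, h1, by omega⟩
    · rintro ⟨⟨q, hq, h1, h2⟩, ⟨r, hr, h3, h4⟩⟩
      refine ⟨?_, ?_⟩
      · have : q.2 ∈ pvGrp l k := (pvGrp_mem l k q.2).mpr ⟨q, hq, h1, rfl⟩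
        rcases (hv q.2).mpr this with h | h
        · exact Or.inl (by omega)
        · exact Or.inr ⟨q.2, h, h2⟩
      · have : r.2 ∈ pvGrp l k := (pvGrp_mem l k r.2).mpr ⟨r, hr, h3, rfl⟩
        rcases (hv r.2).mpr this with h | h
        · exact Or.inl (by omega)
        · exact Or.inr ⟨r.2, h, h4⟩

-- ===== VERDICT =====
theorem countIdleRobots_spec : Claim_equal_countIdleRobots := by
  intro xs ys _
  unfold Spec_countIdleRobots countIdleRobots countIdleRobots_alt
  simp only []
  set pts := xs.zip ys with hpts
  apply PySem.List.foldl_congr_mem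
  intro acc p hp
  have hA : pts.foldl (fun d q => pvAStep d q.2 q.1)
      (PySem.Dict.empty : PySem.Dict Int (Int × Int))
      = (pts.map (fun q => (q.2, q.1))).foldl (fun d q => pvAStep d q.1 q.2)
        (PySem.Dict.empty : PySem.Dict Int (Int × Int)) := by
    rw [List.foldl_map]
  have h1 := pvCondEq (pts.map (fun q => (q.2, q.1))) p.2 p.1
    (List.mem_map.mpr ⟨p, hp, rfl⟩)
  have h2 := pvCondEq pts p.1 p.2 hp
  rw [hA, h1, h2, pvInterior]
  simp only [List.any_map, Function.comp_def, Bool.and_assoc]
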